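-- pv_equiv track=rewrite | github.com/vitmistina/advent-of-code-2024 | 2024_04/aoc_2024_04.py | extract_diagonal_slices
-- ===== SOURCE A (Python) =====
-- from typing import List, Dict
--
-- def extract_diagonal_slices(data: List[str]) -> List[str]:
--     if not data:
--         return []
--
--     rows, cols = len(data), len(data[0])
--     diagonals = []
--
--     for d in range(rows + cols - 1):
--         diagonal = [data[row][d - row] for row in range(max(0, d - cols + 1), min(rows, d + 1))]
--         diagonals.append("".join(diagonal))
--
--     return diagonals
-- ===== SOURCE B (Python) =====
-- def extract_diagonal_slices(data):
--     if not data: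
--         return []
--     rows, cols = len(data), len(data[0])
--     groups = [""] * (rows + cols - 1)
--     for r in range(rows):
--         row = data[r]
--         for c in range(cols):
--             groups[r + c] += row[c]
--     return groups
-- ===== Notes on version B (the rewrite author's own statement) =====
-- stated objective: simpler
-- what changed: Replaces per-diagonal range arithmetic (for each of the rows+cols-1 diagonals, a comprehension with max/min index bounds) by a single bucketing pass over all cells that appends data[r][c] to bucket r+c.
import Mathlib
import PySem

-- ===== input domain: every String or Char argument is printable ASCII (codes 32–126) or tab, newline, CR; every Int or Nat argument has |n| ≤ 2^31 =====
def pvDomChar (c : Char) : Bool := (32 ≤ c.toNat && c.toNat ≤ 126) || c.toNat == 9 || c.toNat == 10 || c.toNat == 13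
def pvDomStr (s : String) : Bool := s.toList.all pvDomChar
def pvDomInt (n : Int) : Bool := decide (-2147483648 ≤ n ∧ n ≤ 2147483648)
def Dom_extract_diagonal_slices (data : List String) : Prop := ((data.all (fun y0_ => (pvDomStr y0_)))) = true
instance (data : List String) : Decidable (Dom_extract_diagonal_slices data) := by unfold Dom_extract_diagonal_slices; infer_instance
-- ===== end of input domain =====

-- B replaces A's per-diagonal index arithmetic by one bucketing pass over all cells (same cost, simpler).
-- Return-value equivalence only; neither program mutates its argument.

-- ===== PORT A =====
-- Python's data[row][d - row] (indices provably in range under Pre_) is ported with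
-- PySem.List.pyGetD on the row list / its character list; "".join over 1-char strings
-- is ported as String.ofList over the collected characters (exact under Pre_).
def extract_diagonal_slices (data : List String) : List String :=
  if data = [] then []
  else
    let rows : Int := data.length
    let cols : Int := (PySem.List.pyGetD data 0 "").toList.length
    (PySem.List.pyRange 0 (rows + cols - 1) 1).foldl
      (fun diagonals d =>
        let diagonal : List Char :=
          (PySem.List.pyRange (max 0 (d - cols + 1)) (min rows (d + 1)) 1).map
            (fun row => PySem.List.pyGetD (PySem.List.pyGetD data row "").toList (d - row) ' ')
        diagonals ++ [String.ofList diagonal])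
      []

-- ===== PORT B =====
-- groups[r + c] += row[c] is ported as List.modify at index r+c, appending the character
-- (r, c are the nonnegative loop counters of range(rows) / range(cols)).
def extract_diagonal_slices_alt (data : List String) : List String :=
  if data = [] then []
  else
    let rows : Nat := data.length
    let cols : Nat := (data.getD 0 "").toList.length
    (List.range rows).foldl
      (fun groups r =>
        let row : List Char := (data.getD r "").toList
        (List.range cols).foldl
          (fun gs c => gs.modify (r + c) (fun s => s ++ String.ofList [row.getD c ' ']))
          groups)
      (List.replicate (rows + cols - 1) "")

-- ===== PRECONDITION & SPEC =====
-- Pre_ excludes exactly the jagged grids on which some row is shorter than row 0: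
-- there Python A raises IndexError (data[row][d - row]) and Python B raises the same (row[c]).
def Pre_extract_diagonal_slices (data : List String) : Prop :=
  ∀ s ∈ data, (data.getD 0 "").toList.length ≤ s.toList.length
instance (data : List String) : Decidable (Pre_extract_diagonal_slices data) := by
  unfold Pre_extract_diagonal_slices; infer_instance

def pvWitness_extract_diagonal_slices : List String := ["abc", "def"]

def Spec_extract_diagonal_slices (data : List String) (out : List String) : Prop := out = extract_diagonal_slices_alt data
instance (data : List String) (out : List String) : Decidable (Spec_extract_diagonal_slices data out) := by unfold Spec_extract_diagonal_slices; infer_instance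

-- ===== CLAIM (what is proved, stated in full; the proofs are below) =====
def Claim_equal_extract_diagonal_slices : Prop := ∀ (data : List String), Dom_extract_diagonal_slices data → Pre_extract_diagonal_slices data → Spec_extract_diagonal_slices data (extract_diagonal_slices data)

-- ===== LEMMAS AND PROOFS =====

-- characters of diagonal d contributed by the rows in rs (in order)
def pvDiag (data : List String) (m : Nat) (rs : List Nat) (d : Nat) : List Char :=
  (rs.filter (fun r => decide (r ≤ d ∧ d < r + m))).map
    (fun r => (data.getD r "").toList.getD (d - r) ' ')

theorem pvInner (data : List String) (m : Nat) (r : Nat) (gs : List String) :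
    (List.range m).foldl
      (fun gs c => gs.modify (r + c) (fun s => s ++ String.ofList [(data.getD r "").toList.getD c ' '])) gs
    = gs.mapIdx (fun i s =>
        s ++ String.ofList (if r ≤ i ∧ i < r + m then [(data.getD r "").toList.getD (i - r) ' '] else [])) := by
  induction m generalizing gs with
  | zero =>
    apply List.ext_getElem?
    intro j
    simp [List.getElem?_mapIdx]
    cases gs[j]? with
    | none => rfl
    | some s => simp [show ¬ (r ≤ j ∧ j < r) from by omega]
  | succ m ih =>
    rw [List.range_succ, List.foldl_append, ih]
    apply List.ext_getElem?
    intro j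
    simp only [List.foldl_cons, List.foldl_nil, List.getElem?_modify, List.getElem?_mapIdx]
    cases gs[j]? with
    | none => rfl
    | some s =>
      simp only [Option.map_eq_map, Option.map]
      by_cases hj : r + m = j
      · subst hj
        simp [show r ≤ r + m ∧ r + m < r + (m+1) from by omega]
      · by_cases h1 : r ≤ j ∧ j < r + m
        · simp [hj, h1, show r ≤ j ∧ j < r + (m+1) from by omega]
        · simp [hj, h1, show ¬ (r ≤ j ∧ j < r + (m+1)) from by omega]

theorem pvOuter (data : List String) (m : Nat) (rs : List Nat) (gs : List String) :
    rs.foldl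
      (fun groups r =>
        (List.range m).foldl
          (fun gs c => gs.modify (r + c) (fun s => s ++ String.ofList [(data.getD r "").toList.getD c ' ']))
          groups) gs
    = gs.mapIdx (fun i s => s ++ String.ofList (pvDiag data m rs i)) := by
  induction rs generalizing gs with
  | nil =>
    apply List.ext_getElem?
    intro j
    simp [List.getElem?_mapIdx, pvDiag]
  | cons r rs ih =>
    rw [List.foldl_cons, pvInner, ih]
    apply List.ext_getElem?
    intro j
    simp only [List.getElem?_mapIdx]
    cases gs[j]? with
    | none => rfl
    | some s =>
      simp only [Option.map_some, Option.some.injEq, pvDiag, List.filter_cons]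
      by_cases h : r ≤ j ∧ j < r + m
      · simp only [h, and_self, decide_true]
        rw [String.append_assoc, ← String.ofList_append]
        rfl
      · simp [h]

-- the filtered row range of diagonal d is the consecutive block A enumerates
theorem pvFilterRange (n m d : Nat) :
    (List.range n).filter (fun r => decide (r ≤ d ∧ d < r + m))
      = List.range' (d + 1 - m) (min n (d + 1) - (d + 1 - m)) := by
  induction n with
  | zero => simp
  | succ n ih =>
    rw [List.range_succ, List.filter_append, ih]
    by_cases h : n ≤ d ∧ d < n + m
    · rw [show min (n+1) (d+1) - (d+1-m) = (min n (d+1) - (d+1-m)) + 1 from by omega,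
          List.range'_concat,
          show d + 1 - m + 1 * (min n (d+1) - (d+1-m)) = n from by omega]
      simp [h]
    · rw [show min (n+1) (d+1) - (d+1-m) = min n (d+1) - (d+1-m) from by omega]
      simp [h]

theorem extract_diagonal_slices_eq (data : List String) (h : data ≠ []) :
    extract_diagonal_slices data
      = (List.range (data.length + (data.getD 0 "").toList.length - 1)).map
          (fun d => String.ofList (pvDiag data (data.getD 0 "").toList.length (List.range data.length) d)) := by
  have hn : 1 ≤ data.length := by
    cases data with
    | nil => exact absurd rfl h
    | cons a l => simp
  unfold extract_diagonal_slices
  rw [if_neg h]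
  rw [PySem.List.foldl_append_singleton_eq_map]
  rw [List.nil_append, PySem.List.pyGetD_zero]
  rw [show ((data.length : Int) + ((data.getD 0 "").toList.length : Int) - 1)
        = ((data.length + (data.getD 0 "").toList.length - 1 : Nat) : Int) from by omega]
  rw [PySem.List.pyRange_zero_natCast, List.map_map]
  apply List.map_congr_left
  intro d _
  simp only [Function.comp]
  congr 1
  rw [pvDiag, pvFilterRange]
  rw [PySem.List.pyRange_one]
  rw [show (max 0 ((d:Int) - ((data.getD 0 "").toList.length : Int) + 1))
        = ((d + 1 - (data.getD 0 "").toList.length : Nat) : Int) from by omega]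
  rw [show (min (data.length : Int) ((d:Int) + 1))
        = ((min data.length (d+1) : Nat) : Int) from by omega]
  rw [show (((min data.length (d+1) : Nat) : Int) - ((d + 1 - (data.getD 0 "").toList.length : Nat) : Int)).toNat
        = min data.length (d+1) - (d + 1 - (data.getD 0 "").toList.length) from by omega]
  rw [List.range'_eq_map_range, List.map_map, List.map_map]
  apply List.map_congr_left
  intro k hk
  rw [List.mem_range] at hk
  simp only [Function.comp]
  rw [show ((((d + 1 - (data.getD 0 "").toList.length : Nat)) : Int) + (k : Int))
        = ((d + 1 - (data.getD 0 "").toList.length + k : Nat) : Int) from by push_cast; ring]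
  rw [PySem.List.pyGetD_natCast]
  rw [show ((d:Int) - ((d + 1 - (data.getD 0 "").toList.length + k : Nat) : Int))
        = ((d - (d + 1 - (data.getD 0 "").toList.length + k) : Nat) : Int) from by omega]
  rw [PySem.List.pyGetD_natCast]

theorem alt_eq (data : List String) (h : data ≠ []) :
    extract_diagonal_slices_alt data
      = (List.range (data.length + (data.getD 0 "").toList.length - 1)).map
          (fun d => String.ofList (pvDiag data (data.getD 0 "").toList.length (List.range data.length) d)) := by
  unfold extract_diagonal_slices_alt
  rw [if_neg h, pvOuter]
  apply List.ext_getElem?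
  intro j
  simp [List.getElem?_mapIdx, List.getElem?_replicate]
  split_ifs with hj
  · simp [hj]
  · simp [hj]

-- ===== VERDICT (by name: the statement is the Claim_ definition above) =====
theorem extract_diagonal_slices_spec : Claim_equal_extract_diagonal_slices := by
  intro data _ _
  unfold Spec_extract_diagonal_slices
  by_cases h : data = []
  · subst h; rfl
  · rw [extract_diagonal_slices_eq data h, alt_eq data h]
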